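-- pv_equiv track=rewrite | github.com/sriyuthsagi/CSCI-1100-Computer-Science-I | Labs/Lab 10/Lab_10_3.py | closest1
-- ===== SOURCE A (Python) =====
-- def closest1(L):
--     if len(L) < 2:
--         tup = (None, None)
--     else:
--         differences = []
--         for i in range(len(L)):
--             for j in range(len(L)):
--                 diff = L[j] - L[i]
--                 if diff != 0:
--                     differences.append([abs(diff), L[i], L[j]])
--         mn = differences.index(min(differences))
--         tup = (differences[mn][1], differences[mn][2])
--     return tup
-- ===== SOURCE B (Python) =====
-- def closest1(L):
--     # B: sort once, take the minimal nonzero adjacent gap d, then return the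
--     # smallest value x with x + d also present (O(n log n) vs A's O(n^2) scan).
--     if len(L) < 2:
--         return (None, None)
--     s = sorted(L)
--     d = None
--     for u, v in zip(s, s[1:]):
--         if u < v and (d is None or v - u < d):
--             d = v - u
--     if d is None:
--         return (None, None)
--     vals = set(L)
--     for x in s:
--         if x + d in vals:
--             return (x, x + d)
-- ===== Notes on version B (the rewrite author's own statement) =====
-- stated objective: faster
-- what changed: A enumerates all n^2 ordered pairs, stores a triple per pair and takes the lexicographic minimum of that list; B sorts once, finds the minimal nonzero adjacent gap d, and returns the smallest element x with x+d also in the list (set lookup); Pre_ excludes lists of length >= 2 whose elements are all equal, on which A raises ValueError while B returns (None, None).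
import Mathlib
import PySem

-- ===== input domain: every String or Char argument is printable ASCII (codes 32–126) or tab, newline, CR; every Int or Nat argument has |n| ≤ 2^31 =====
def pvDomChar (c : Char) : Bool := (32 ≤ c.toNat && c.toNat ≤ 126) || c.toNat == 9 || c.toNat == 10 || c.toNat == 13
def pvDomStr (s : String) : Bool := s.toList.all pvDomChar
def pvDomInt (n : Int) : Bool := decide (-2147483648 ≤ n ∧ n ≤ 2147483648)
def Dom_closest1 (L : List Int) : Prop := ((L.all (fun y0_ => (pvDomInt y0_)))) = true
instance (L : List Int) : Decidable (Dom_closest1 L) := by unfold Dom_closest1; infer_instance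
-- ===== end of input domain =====

-- B sorts once and scans adjacent gaps instead of A's quadratic pair enumeration (measurably faster, asymptotic O(n log n) vs O(n^2)).


-- ===== PORT A =====
-- the 'differences' list A builds with its two nested index loops
def diffsA (L : List Int) : List (List Int) :=
  (PySem.List.pyRange 0 (L.length : Int) 1).foldl (fun acc i =>
    (PySem.List.pyRange 0 (L.length : Int) 1).foldl (fun acc j =>
      if PySem.List.pyGetD L j 0 - PySem.List.pyGetD L i 0 ≠ 0 then
        acc ++ [[|PySem.List.pyGetD L j 0 - PySem.List.pyGetD L i 0|,
                 PySem.List.pyGetD L i 0, PySem.List.pyGetD L j 0]]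
      else acc) acc) []

def closest1 (L : List Int) : List (Option Int) :=
  if L.length < 2 then [none, none]
  else
    let differences := diffsA L
    match PySem.List.min? differences (fun x => x) with
    | none => [none, none]      -- Python raises ValueError here (min over no candidates); excluded by Pre_
    | some m =>
      match PySem.List.index? differences m with
      | none => [none, none]    -- unreachable (m is a member)
      | some mn =>
        match PySem.List.pyGet? differences (mn : Int) with
        | none => [none, none]  -- unreachable (mn is in range)
        | some t => [PySem.List.pyGet? t 1, PySem.List.pyGet? t 2]

-- ===== PORT B =====
-- one step of B's running minimum over adjacent gaps ('if u < v and (d is None or v - u < d): d = v - u')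
def bstep (acc : Option Int) (p : Int × Int) : Option Int :=
  match acc with
  | none => if p.1 < p.2 then some (p.2 - p.1) else none
  | some dv => if p.1 < p.2 ∧ p.2 - p.1 < dv then some (p.2 - p.1) else some dv

def closest1_alt (L : List Int) : List (Option Int) :=
  if L.length < 2 then [none, none]
  else
    let s := PySem.List.sorted L (fun x => x) false
    match (s.zip s.tail).foldl bstep none with
    | none => [none, none]      -- all elements equal: no pair with nonzero difference
    | some dv =>
      let vals := PySem.Set.ofList L
      match s.find? (fun x => PySem.Set.contains vals (x + dv)) with
      | none => [none, none]    -- unreachable (the gap dv is realized by some pair)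
      | some a => [some a, some (a + dv)]

-- ===== PRECONDITION & SPEC =====
-- Pre_ excludes lists of length ≥ 2 whose elements are all equal: there A's 'differences' list has no entries and Python's min raises ValueError.
def Pre_closest1 (L : List Int) : Prop := L.length < 2 ∨ ∃ a ∈ L, ∃ b ∈ L, a ≠ b
instance (L : List Int) : Decidable (Pre_closest1 L) := by unfold Pre_closest1; infer_instance
def pvWitness_closest1 : List Int := [1, 3, 7]

def Spec_closest1 (L : List Int) (out : List (Option Int)) : Prop := out = closest1_alt L
instance (L : List Int) (out : List (Option Int)) : Decidable (Spec_closest1 L out) := by unfold Spec_closest1; infer_instance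

-- ===== CLAIM (what is proved, stated in full; the proofs are below) =====
def Claim_equal_closest1 : Prop := ∀ (L : List Int), Dom_closest1 L → Pre_closest1 L → Spec_closest1 L (closest1 L)

-- ===== LEMMAS AND PROOFS =====

-- ≤ on 3-element Int lists is Python's lexicographic list comparison
theorem le3_iff (x1 y1 z1 x2 y2 z2 : Int) :
    (([x1,y1,z1] : List Int) ≤ [x2,y2,z2]) ↔
      (x1 < x2 ∨ (x1 = x2 ∧ (y1 < y2 ∨ (y1 = y2 ∧ z1 ≤ z2)))) := by
  rw [← not_lt]
  show ¬ List.Lex (· < ·) _ _ ↔ _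
  simp [List.cons_lex_cons_iff, List.not_lex_nil]
  omega

-- A's min? elaborates with core's List.instLT; the order lemmas need the LinearOrder instance; both are lexicographic
theorem minA_eq (xs : List (List Int)) :
    PySem.List.min? xs (fun x => x) =
      @PySem.List.min? (List Int) (List Int) List.instLinearOrder.toLT LinearOrder.toDecidableLT xs (fun x => x) := by
  simp only [PySem.List.min?]
  congr 1
  funext acc x
  cases acc with
  | none => rfl
  | some m =>
    show @ite _ (@LT.lt _ List.instLT x m) (x.decidableLT m) (Option.some x) (some m)
       = @ite _ (@LT.lt _ List.instLinearOrder.toLT x m) (LinearOrder.toDecidableLT x m) (Option.some x) (some m)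
    have hiff : (@LT.lt _ List.instLT x m) ↔ (@LT.lt _ List.instLinearOrder.toLT x m) := by
      rw [show (@LT.lt _ List.instLT x m) = List.lt x m from rfl, List.lt_iff_lex_lt]
    by_cases h : @LT.lt _ List.instLinearOrder.toLT x m
    · rw [if_pos (hiff.mpr h), if_pos h]
    · rw [if_neg (fun hc => h (hiff.mp hc)), if_neg h]

-- membership in A's 'differences' list
theorem mem_diffsA (L : List Int) (t : List Int) :
    t ∈ diffsA L ↔ ∃ a ∈ L, ∃ b ∈ L, b - a ≠ 0 ∧ t = [|b - a|, a, b] := by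
  unfold diffsA
  simp only [PySem.List.foldl_append_ite, PySem.List.foldl_append_eq_flatMap,
    List.nil_append, List.mem_flatMap, List.mem_map, List.mem_filter,
    PySem.List.mem_pyRange_one]
  constructor
  · rintro ⟨i, ⟨hi0, hi1⟩, j, ⟨⟨hj0, hj1⟩, hne⟩, rfl⟩
    rw [PySem.List.pyGetD_eq_getElem L 0 hi0 hi1, PySem.List.pyGetD_eq_getElem L 0 hj0 hj1] at *
    exact ⟨L[i.toNat], List.getElem_mem _, L[j.toNat], List.getElem_mem _, by simpa using hne, rfl⟩
  · rintro ⟨a, ha, b, hb, hne, rfl⟩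
    rcases List.mem_iff_getElem.mp ha with ⟨n1, h1, rfl⟩
    rcases List.mem_iff_getElem.mp hb with ⟨n2, h2, rfl⟩
    refine ⟨(n1 : Int), ⟨by omega, by exact_mod_cast h1⟩, (n2 : Int), ⟨⟨by omega, by exact_mod_cast h2⟩, ?_⟩, ?_⟩ <;>
      rw [PySem.List.pyGetD_eq_getElem L 0 (by omega) (by exact_mod_cast h2),
          PySem.List.pyGetD_eq_getElem L 0 (by omega) (by exact_mod_cast h1)] <;>
      simp_all

-- B's fold returns none iff no adjacent pair increases
theorem bfold_none (ps : List (Int × Int)) (a : Option Int) :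
    ps.foldl bstep a = none ↔ (a = none ∧ ∀ p ∈ ps, ¬ p.1 < p.2) := by
  induction ps generalizing a with
  | nil => simp
  | cons q ps ih =>
    rw [List.foldl_cons, ih]
    cases a with
    | none =>
      simp only [bstep]
      by_cases h : q.1 < q.2 <;> simp [h] <;> intros <;> omega
    | some dv =>
      simp only [bstep]
      split <;> simp

-- B's fold returns the minimum over the initial value and all positive adjacent gaps
theorem bfold_some (ps : List (Int × Int)) (a : Option Int) (d : Int)
    (h : ps.foldl bstep a = some d) :
    (a = some d ∨ ∃ p ∈ ps, p.1 < p.2 ∧ p.2 - p.1 = d) ∧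
      (∀ d0, a = some d0 → d ≤ d0) ∧ (∀ p ∈ ps, p.1 < p.2 → d ≤ p.2 - p.1) := by
  induction ps generalizing a with
  | nil => simp at h; simp [h]
  | cons q ps ih =>
    rw [List.foldl_cons] at h
    obtain ⟨h1, h2, h3⟩ := ih (bstep a q) h
    refine ⟨?_, ?_, ?_⟩
    · rcases h1 with hb | ⟨p, hp, hlt, he⟩
      · cases a with
        | none =>
          by_cases hq : q.1 < q.2
          · simp only [bstep, if_pos hq, Option.some.injEq] at hb
            exact Or.inr ⟨q, by simp, hq, hb⟩
          · simp [bstep, hq] at hb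
        | some dv =>
          by_cases hq : q.1 < q.2 ∧ q.2 - q.1 < dv
          · simp only [bstep, if_pos hq, Option.some.injEq] at hb
            exact Or.inr ⟨q, by simp, hq.1, hb⟩
          · simp only [bstep, if_neg hq, Option.some.injEq] at hb
            exact Or.inl (by rw [hb])
      · exact Or.inr ⟨p, List.mem_cons_of_mem _ hp, hlt, he⟩
    · intro d0 ha
      subst ha
      by_cases hq : q.1 < q.2 ∧ q.2 - q.1 < d0
      · have := h2 (q.2 - q.1) (by simp [bstep, if_pos hq])
        omega
      · exact h2 d0 (by simp [bstep, if_neg hq])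
    · intro p hp hlt
      rcases List.mem_cons.mp hp with rfl | hp'
      · cases a with
        | none => exact h2 (p.2 - p.1) (by simp [bstep, if_pos hlt])
        | some dv =>
          by_cases hq : p.1 < p.2 ∧ p.2 - p.1 < dv
          · exact h2 (p.2 - p.1) (by simp [bstep, if_pos hq])
          · have := h2 dv (by simp [bstep, if_neg hq])
            omega
      · exact h3 p hp' hlt

-- in a sorted list, any increasing pair dominates some increasing adjacent pair
theorem sorted_gap (s : List Int) (hpw : s.Pairwise (· ≤ ·)) :
    ∀ x ∈ s, ∀ y ∈ s, x < y →
      ∃ p ∈ s.zip s.tail, p.1 < p.2 ∧ p.2 - p.1 ≤ y - x := by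
  induction s with
  | nil => simp
  | cons u t ih =>
    intro x hx y hy hxy
    match t with
    | [] =>
      simp at hx hy
      omega
    | v :: t' =>
      have hpw' : (v :: t').Pairwise (· ≤ ·) := hpw.of_cons
      have huv : u ≤ v := (List.pairwise_cons.mp hpw).1 v (by simp)
      have hzip : (u :: v :: t').zip (u :: v :: t').tail = (u, v) :: ((v :: t').zip t') := rfl
      rcases List.mem_cons.mp hx with rfl | hx'
      · have hy' : y ∈ v :: t' := by
          rcases List.mem_cons.mp hy with rfl | h
          · omega
          · exact h
        have hvy : v ≤ y := by
          rcases List.mem_cons.mp hy' with rfl | h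
          · exact le_refl _
          · exact (List.pairwise_cons.mp hpw').1 y h
        by_cases huv' : x < v
        · exact ⟨(x, v), by rw [hzip]; exact List.mem_cons_self, huv', by omega⟩
        · have hxv : x = v := by omega
          obtain ⟨p, hp, h1, h2⟩ := ih hpw' x (by rw [hxv]; simp) y hy' hxy
          exact ⟨p, by rw [hzip]; exact List.mem_cons_of_mem _ hp, h1, h2⟩
      · have hy' : y ∈ v :: t' := by
          rcases List.mem_cons.mp hy with rfl | h
          · have : y ≤ x := (List.pairwise_cons.mp hpw).1 x hx'
            omega
          · exact h
        obtain ⟨p, hp, h1, h2⟩ := ih hpw' x hx' y hy' hxy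
        exact ⟨p, by rw [hzip]; exact List.mem_cons_of_mem _ hp, h1, h2⟩

-- in a sorted list, the first match of a predicate is its minimal match
theorem find?_sorted_min (s : List Int) (hpw : s.Pairwise (· ≤ ·)) (p : Int → Bool) (a : Int)
    (h : s.find? p = some a) : ∀ x ∈ s, p x → a ≤ x := by
  induction s with
  | nil => simp at h
  | cons u t ih =>
    rw [List.find?_cons] at h
    intro x hx hpx
    by_cases hu : p u
    · rw [hu] at h
      obtain rfl : u = a := by injection h
      rcases List.mem_cons.mp hx with rfl | hx'
      · exact le_refl _
      · exact (List.pairwise_cons.mp hpw).1 x hx'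
    · rw [Bool.not_eq_true] at hu
      rw [hu] at h
      rcases List.mem_cons.mp hx with rfl | hx'
      · simp [hpx] at hu
      · exact ih hpw.of_cons h x hx' hpx

-- a member of a list is found by index? and read back by pyGet?
theorem index?_pyGet? (xs : List (List Int)) (m : List Int) (h : m ∈ xs) :
    ∃ k, PySem.List.index? xs m = some k ∧ PySem.List.pyGet? xs (k : Int) = some m := by
  simp only [PySem.List.index?]
  rcases Option.isSome_iff_exists.mp (List.isSome_idxOf?.mpr h) with ⟨k, hk⟩
  rcases List.idxOf?_eq_some_iff.mp hk with ⟨hlt, heq, _⟩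
  exact ⟨k, hk, by rw [PySem.List.pyGet?_natCast]; exact List.getElem?_eq_some_iff.mpr ⟨hlt, heq⟩⟩

-- ===== VERDICT (by name: the statement is the Claim_ definition above) =====
theorem closest1_spec : Claim_equal_closest1 := by
  unfold Claim_equal_closest1
  intro L _ hpre
  unfold Spec_closest1
  by_cases hlen : L.length < 2
  · simp [closest1, closest1_alt, hlen]
  · obtain ⟨a0, ha0, b0, hb0, hne0⟩ : ∃ a ∈ L, ∃ b ∈ L, a ≠ b := by
      rcases hpre with h | h
      · omega
      · exact h
    set s := PySem.List.sorted L (fun x => x) false with hs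
    have hperm : s.Perm L := PySem.List.sorted_perm L (fun x => x) false
    have hpw : s.Pairwise (· ≤ ·) := by simpa using PySem.List.sorted_pairwise L (fun x => x)
    have hmem : ∀ x : Int, x ∈ s ↔ x ∈ L := fun x => hperm.mem_iff
    -- some increasing pair exists in s
    obtain ⟨x0, y0, hx0s, hy0s, hxy0⟩ : ∃ x y : Int, x ∈ s ∧ y ∈ s ∧ x < y := by
      rcases lt_or_gt_of_ne hne0 with h | h
      · exact ⟨a0, b0, (hmem a0).mpr ha0, (hmem b0).mpr hb0, h⟩
      · exact ⟨b0, a0, (hmem b0).mpr hb0, (hmem a0).mpr ha0, h⟩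
    obtain ⟨padj0, hpadj0, hlt0, _⟩ := sorted_gap s hpw x0 hx0s y0 hy0s hxy0
    -- B's gap fold returns some dB
    obtain ⟨dB, hdB⟩ : ∃ d, (s.zip s.tail).foldl bstep none = some d := by
      cases hcase : (s.zip s.tail).foldl bstep none with
      | none => exact absurd (((bfold_none _ _).mp hcase).2 padj0 hpadj0) (by simpa using hlt0)
      | some d => exact ⟨d, rfl⟩
    obtain ⟨hex, -, hminadj⟩ := bfold_some _ _ _ hdB
    replace hex : ∃ p ∈ s.zip s.tail, p.1 < p.2 ∧ p.2 - p.1 = dB := by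
      rcases hex with h | h
      · exact absurd h (by simp)
      · exact h
    obtain ⟨⟨u, v⟩, hpadj, hplt, hpd⟩ := hex
    simp only at hplt hpd
    have hdBpos : 0 < dB := by omega
    have hvs : v ∈ s := List.mem_of_mem_tail (List.of_mem_zip hpadj).2
    have hus : u ∈ s := (List.of_mem_zip hpadj).1
    -- dB is the global minimum gap
    have hdmin : ∀ x ∈ L, ∀ y ∈ L, x < y → dB ≤ y - x := by
      intro x hx y hy hxy
      obtain ⟨p, hp, h1, h2⟩ := sorted_gap s hpw x ((hmem x).mpr hx) y ((hmem y).mpr hy) hxy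
      have := hminadj p hp h1
      omega
    -- B's find? returns some aB
    have hpred_iff : ∀ x : Int, (PySem.Set.contains (PySem.Set.ofList L) (x + dB) = true) ↔ x + dB ∈ L := by
      intro x
      rw [PySem.Set.contains_iff]
      exact PySem.Set.mem_ofList ..
    obtain ⟨aB, hfind⟩ :
        ∃ a, s.find? (fun x => PySem.Set.contains (PySem.Set.ofList L) (x + dB)) = some a := by
      cases hcase : s.find? (fun x => PySem.Set.contains (PySem.Set.ofList L) (x + dB)) with
      | none =>
        have hu : PySem.Set.contains (PySem.Set.ofList L) (u + dB) = true :=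
          (hpred_iff u).mpr (by rw [show u + dB = v by omega]; exact (hmem v).mp hvs)
        exact absurd hu (by simpa using List.find?_eq_none.mp hcase u hus)
      | some a => exact ⟨a, rfl⟩
    have haBs : aB ∈ s := List.mem_of_find?_eq_some hfind
    have haBL : aB ∈ L := (hmem aB).mp haBs
    have haBd : aB + dB ∈ L := (hpred_iff aB).mp (by simpa using List.find?_some hfind)
    have haBmin : ∀ x ∈ L, x + dB ∈ L → aB ≤ x := fun x hx hxd =>
      find?_sorted_min s hpw _ aB hfind x ((hmem x).mpr hx) ((hpred_iff x).mpr hxd)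
    -- B's value
    have hBval : closest1_alt L = [some aB, some (aB + dB)] := by
      simp only [closest1_alt, if_neg hlen, ← hs, hdB, hfind]
    -- A's side: the minimal triple is [dB, aB, aB + dB]
    have htB : [dB, aB, aB + dB] ∈ diffsA L :=
      (mem_diffsA L _).mpr ⟨aB, haBL, aB + dB, haBd, by omega, by
        rw [show aB + dB - aB = dB by omega, abs_of_pos hdBpos]⟩
    obtain ⟨m, hm⟩ : ∃ m, PySem.List.min? (diffsA L) (fun x => x) = some m := by
      cases hcase : PySem.List.min? (diffsA L) (fun x => x) with
      | none =>
        rw [PySem.List.min?_eq_none_iff] at hcase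
        rw [hcase] at htB
        exact absurd htB (by simp)
      | some m => exact ⟨m, rfl⟩
    have hm' : @PySem.List.min? (List Int) (List Int) List.instLinearOrder.toLT
        LinearOrder.toDecidableLT (diffsA L) (fun x => x) = some m := by
      rw [← minA_eq]
      exact hm
    have hmmem : m ∈ diffsA L := @PySem.List.min?_mem (List Int) (List Int) List.instLinearOrder.toLT LinearOrder.toDecidableLT _ _ _ hm'
    have hmin : ∀ y ∈ diffsA L, m ≤ y := fun y hy => PySem.List.min?_isMin hm' y hy
    have hmt : m = [dB, aB, aB + dB] := by
      refine le_antisymm (hmin _ htB) ?_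
      obtain ⟨a, haL, b, hbL, hbne, rfl⟩ := (mem_diffsA L m).mp hmmem
      rw [le3_iff]
      have hd' : dB ≤ |b - a| := by
        rcases lt_or_gt_of_ne (show a ≠ b by omega) with h | h
        · have := hdmin a haL b hbL h
          rw [abs_of_pos (by omega)]
          omega
        · have := hdmin b hbL a haL h
          rw [abs_of_neg (by omega)]
          omega
      by_cases heq : dB = |b - a|
      · right
        refine ⟨heq, ?_⟩
        by_cases hab : a < b
        · have hb' : b = a + dB := by
            rw [abs_of_pos (by omega)] at heq
            omega
          have haBa : aB ≤ a := haBmin a haL (by rw [show a + dB = b by omega]; exact hbL)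
          by_cases h3 : aB = a
          · right
            exact ⟨h3, by omega⟩
          · left
            omega
        · have hb' : b = a - dB := by
            rw [abs_of_neg (by omega)] at heq
            omega
          have := haBmin b hbL (by rw [show b + dB = a by omega]; exact haL)
          left
          omega
      · left
        omega
    subst hmt
    obtain ⟨k, hk, hkget⟩ := index?_pyGet? (diffsA L) _ hmmem
    simp only [closest1, if_neg hlen, hm, hk, hkget, hBval]
    rfl
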